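-- pv_equiv track=rewrite | github.com/z992907759/git-archeologist | socratic_git/miner.py | clean_diff
-- ===== SOURCE A (Python) =====
-- def clean_diff(diff_text):
--     """Clean diff by dropping noisy files and limiting block/line volume."""
--     if not diff_text:
--         return ""
--
--     excluded_exact = {"package-lock.json", "yarn.lock", "pnpm-lock.yaml"}
--     excluded_ext = (".png", ".jpg", ".pdf", ".ipynb")
--
--     max_lines_per_block = 40
--     max_blocks = 10
--     max_total_lines = 400
--
--     lines = diff_text.splitlines()
--     blocks = []
--     current = []
--
--     for line in lines:
--         if line.startswith("diff --git "):
--             if current: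
--                 blocks.append(current)
--             current = [line]
--         else:
--             if current:
--                 current.append(line)
--     if current:
--         blocks.append(current)
--
--     kept = []
--     total = 0
--     kept_blocks = 0
--
--     for block in blocks:
--         header = block[0]
--         parts = header.split()
--         path = ""
--         if len(parts) >= 4 and parts[3].startswith("b/"):
--             path = parts[3][2:]
--
--         lower_path = path.lower()
--         base_name = lower_path.rsplit("/", 1)[-1]
--         if base_name in excluded_exact or lower_path.endswith(excluded_ext):
--             continue
--
--         trimmed = block[:max_lines_per_block]
--         if total + len(trimmed) > max_total_lines:
--             remain = max_total_lines - total
--             if remain <= 0: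
--                 break
--             trimmed = trimmed[:remain]
--
--         kept.extend(trimmed)
--         total += len(trimmed)
--         kept_blocks += 1
--
--         if kept_blocks >= max_blocks or total >= max_total_lines:
--             break
--
--     return "\n".join(kept)
-- ===== SOURCE B (Python) =====
-- def clean_diff(diff_text):
--     """Single streaming pass: finalize each block as the next header (or EOF) arrives."""
--     EXACT = {"package-lock.json", "yarn.lock", "pnpm-lock.yaml"}
--     EXT = (".png", ".jpg", ".pdf", ".ipynb")
--
--     def excluded(header):
--         parts = header.split()
--         path = ""
--         if len(parts) >= 4 and parts[3].startswith("b/"):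
--             path = parts[3][2:]
--         lp = path.lower()
--         return lp.rsplit("/", 1)[-1] in EXACT or lp.endswith(EXT)
--
--     def finalize(block, kept, total, nblocks):
--         # returns (kept, total, nblocks, stop)
--         if excluded(block[0]):
--             return kept, total, nblocks, False
--         trimmed = block[:40]
--         if total + len(trimmed) > 400:
--             remain = 400 - total
--             if remain <= 0:
--                 return kept, total, nblocks, True
--             trimmed = trimmed[:remain]
--         kept = kept + trimmed
--         total += len(trimmed)
--         nblocks += 1
--         return kept, total, nblocks, nblocks >= 10 or total >= 400
--
--     kept, total, nblocks = [], 0, 0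
--     cur = []
--     for line in diff_text.splitlines():
--         if line.startswith("diff --git "):
--             if cur:
--                 kept, total, nblocks, stop = finalize(cur, kept, total, nblocks)
--                 if stop:
--                     return "\n".join(kept)
--             cur = [line]
--         elif cur:
--             cur.append(line)
--     if cur:
--         kept, total, nblocks, _ = finalize(cur, kept, total, nblocks)
--     return "\n".join(kept)
-- ===== Notes on version B (the rewrite author's own statement) =====
-- stated objective: alternative
-- what changed: B replaces A's two-phase build-all-blocks-then-filter shape by a single streaming pass over the lines that finalizes each block (exclusion test, trimming, caps, early stop) as soon as the next header or the end of input arrives, with the per-block rule factored into helper functions.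
import Mathlib
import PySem

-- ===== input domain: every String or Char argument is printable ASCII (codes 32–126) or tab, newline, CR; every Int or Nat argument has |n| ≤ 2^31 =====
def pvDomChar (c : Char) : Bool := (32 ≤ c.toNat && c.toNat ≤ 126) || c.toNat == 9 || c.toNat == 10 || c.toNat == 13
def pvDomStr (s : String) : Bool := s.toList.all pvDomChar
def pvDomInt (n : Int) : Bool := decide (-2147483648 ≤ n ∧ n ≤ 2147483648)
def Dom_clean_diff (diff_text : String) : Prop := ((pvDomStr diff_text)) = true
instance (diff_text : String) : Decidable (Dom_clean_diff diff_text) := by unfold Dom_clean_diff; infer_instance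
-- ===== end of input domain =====

-- B changes the decomposition: one streaming pass over lines with helper functions, instead of
-- A's build-all-blocks-then-filter two-phase shape; same asymptotic cost (objective: alternative).

-- hand-port of `s.rsplit("/", 1)[-1]` (exact: it is the part of s after the last '/', or all of s);
-- both Pythons contain this very expression, so both ports share the helper.
def pyRsplitLast (s : String) : String :=
  String.ofList ((s.toList.reverse.takeWhile (· ≠ '/')).reverse)

-- ===== PORT A =====
-- A's first loop: gather the lines into blocks (state = (blocks, current), as in the Python)
def cleanA_build : List String → List (List String) → List String → List (List String) × List String
  | [], blocks, current => (blocks, current)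
  | line :: ls, blocks, current =>
    if PySem.Str.startswith line "diff --git " then
      cleanA_build ls (if current ≠ [] then blocks ++ [current] else blocks) [line]
    else
      cleanA_build ls blocks (if current ≠ [] then current ++ [line] else current)

-- A's second loop: filter/trim the blocks; `break` is rendered as early return
def cleanA_process : List (List String) → List String → Nat → Nat → List String
  | [], kept, _, _ => kept
  | block :: bs, kept, total, kb =>
    let header := block.getD 0 ""
    let parts := PySem.Str.split₀ header
    let path := if 4 ≤ parts.length && PySem.Str.startswith (parts.getD 3 "") "b/" then
        PySem.Str.slice (parts.getD 3 "") (some 2) none else ""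
    let lp := PySem.Str.lower path
    let base := pyRsplitLast lp
    if base == "package-lock.json" || base == "yarn.lock" || base == "pnpm-lock.yaml"
        || PySem.Str.endswith lp ".png" || PySem.Str.endswith lp ".jpg"
        || PySem.Str.endswith lp ".pdf" || PySem.Str.endswith lp ".ipynb" then
      cleanA_process bs kept total kb
    else
      let trimmed := block.take 40          -- block[:40]
      if total + trimmed.length > 400 then
        let remain := 400 - total           -- remain ≤ 0 in Python ↔ remain = 0 here (Nat)
        if remain = 0 then kept             -- break
        else
          let t := trimmed.take remain      -- trimmed[:remain]
          let kept' := kept ++ t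
          let total' := total + t.length
          let kb' := kb + 1
          if 10 ≤ kb' || 400 ≤ total' then kept' else cleanA_process bs kept' total' kb'
      else
        let kept' := kept ++ trimmed
        let total' := total + trimmed.length
        let kb' := kb + 1
        if 10 ≤ kb' || 400 ≤ total' then kept' else cleanA_process bs kept' total' kb'

def clean_diff (diff_text : String) : String :=
  if diff_text == "" then "" else
  let lines := PySem.Str.splitlines diff_text
  let st := cleanA_build lines [] []
  let blocks := if st.2 ≠ [] then st.1 ++ [st.2] else st.1
  PySem.Str.join "\n" (cleanA_process blocks [] 0 0)

-- ===== PORT B =====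
-- port of Source B's helper `excluded(header)`
def cleanB_excluded (header : String) : Bool :=
  let parts := PySem.Str.split₀ header
  let path := if 4 ≤ parts.length && PySem.Str.startswith (parts.getD 3 "") "b/" then
      PySem.Str.slice (parts.getD 3 "") (some 2) none else ""
  let lp := PySem.Str.lower path
  pyRsplitLast lp == "package-lock.json" || pyRsplitLast lp == "yarn.lock"
    || pyRsplitLast lp == "pnpm-lock.yaml"
    || PySem.Str.endswith lp ".png" || PySem.Str.endswith lp ".jpg"
    || PySem.Str.endswith lp ".pdf" || PySem.Str.endswith lp ".ipynb"

-- port of Source B's helper `finalize(block, kept, total, nblocks)` → (kept, total, nblocks, stop)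
def cleanB_finalize (block kept : List String) (total nb : Nat) :
    List String × Nat × Nat × Bool :=
  if cleanB_excluded (block.getD 0 "") then (kept, total, nb, false)
  else
    let trimmed := block.take 40
    if total + trimmed.length > 400 then
      let remain := 400 - total
      if remain = 0 then (kept, total, nb, true)
      else
        let t := trimmed.take remain
        (kept ++ t, total + t.length, nb + 1,
          decide (10 ≤ nb + 1) || decide (400 ≤ total + t.length))
    else
      (kept ++ trimmed, total + trimmed.length, nb + 1,
        decide (10 ≤ nb + 1) || decide (400 ≤ total + trimmed.length))

-- Source B's single streaming pass over the lines
def cleanB_stream : List String → List String → List String → Nat → Nat → List String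
  | [], cur, kept, total, nb =>
    if cur = [] then kept else (cleanB_finalize cur kept total nb).1
  | l :: ls, cur, kept, total, nb =>
    if PySem.Str.startswith l "diff --git " then
      if cur = [] then cleanB_stream ls [l] kept total nb
      else
        let r := cleanB_finalize cur kept total nb
        if r.2.2.2 then r.1 else cleanB_stream ls [l] r.1 r.2.1 r.2.2.1
    else if cur = [] then cleanB_stream ls [] kept total nb
    else cleanB_stream ls (cur ++ [l]) kept total nb

def clean_diff_alt (diff_text : String) : String :=
  PySem.Str.join "\n" (cleanB_stream (PySem.Str.splitlines diff_text) [] [] 0 0)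

-- ===== PRECONDITION & SPEC =====
def Spec_clean_diff (diff_text : String) (out : String) : Prop := out = clean_diff_alt diff_text
instance (diff_text : String) (out : String) : Decidable (Spec_clean_diff diff_text out) := by unfold Spec_clean_diff; infer_instance

-- ===== CLAIM (what is proved, stated in full; the proofs are below) =====
def Claim_equal_clean_diff : Prop := ∀ (diff_text : String), Dom_clean_diff diff_text → Spec_clean_diff diff_text (clean_diff diff_text)

-- ===== LEMMAS AND PROOFS =====

-- the block list contributed by the remaining lines `ls` given pending buffer `cur`
def buildRest : List String → List String → List (List String)
  | [], cur => if cur = [] then [] else [cur]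
  | l :: ls, cur =>
    if PySem.Str.startswith l "diff --git " then
      if cur = [] then buildRest ls [l] else cur :: buildRest ls [l]
    else if cur = [] then buildRest ls [] else buildRest ls (cur ++ [l])

theorem build_eq (lines : List String) (blocks : List (List String)) (cur : List String) :
    (if (cleanA_build lines blocks cur).2 ≠ [] then
       (cleanA_build lines blocks cur).1 ++ [(cleanA_build lines blocks cur).2]
     else (cleanA_build lines blocks cur).1) = blocks ++ buildRest lines cur := by
  induction lines generalizing blocks cur with
  | nil => by_cases h : cur = [] <;> simp [cleanA_build, buildRest, h]
  | cons l ls ih =>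
    by_cases h1 : PySem.Str.startswith l "diff --git " = true <;> by_cases h2 : cur = [] <;>
        simp_all [cleanA_build, buildRest]

theorem processA_cons (b : List String) (bs : List (List String)) (kept : List String)
    (total kb : Nat) :
    cleanA_process (b :: bs) kept total kb =
      (let r := cleanB_finalize b kept total kb
       if r.2.2.2 then r.1 else cleanA_process bs r.1 r.2.1 r.2.2.1) := by
  simp only [cleanA_process, cleanB_finalize, cleanB_excluded]
  split_ifs <;> simp_all

set_option maxHeartbeats 1000000 in
theorem stream_eq (ls : List String) : ∀ (cur kept : List String) (total nb : Nat),
    cleanB_stream ls cur kept total nb = cleanA_process (buildRest ls cur) kept total nb := by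
  induction ls with
  | nil =>
    intro cur kept total nb
    simp only [cleanB_stream, buildRest]
    by_cases h : cur = []
    · simp [h, cleanA_process]
    · rw [if_neg h, if_neg h, processA_cons]
      simp only [cleanA_process, ite_self]
  | cons l ls ih =>
    intro cur kept total nb
    rw [cleanB_stream, buildRest]
    by_cases h1 : PySem.Str.startswith l "diff --git " = true
    · rw [if_pos h1, if_pos h1]
      by_cases h2 : cur = []
      · rw [if_pos h2, if_pos h2]
        exact ih [l] kept total nb
      · rw [if_neg h2, if_neg h2, processA_cons]
        exact if_congr Iff.rfl rfl (ih [l] _ _ _)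
    · rw [if_neg h1, if_neg h1]
      by_cases h2 : cur = []
      · rw [if_pos h2, if_pos h2]
        exact ih [] kept total nb
      · rw [if_neg h2, if_neg h2]
        exact ih (cur ++ [l]) kept total nb

-- ===== VERDICT (by name: the statement is the Claim_ definition above) =====
theorem clean_diff_spec : Claim_equal_clean_diff := by
  intro s _
  unfold Spec_clean_diff clean_diff clean_diff_alt
  by_cases h : s = ""
  · subst h; decide
  · rw [stream_eq]
    simp only [beq_iff_eq, h, ite_false]
    rw [build_eq]
    simp
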